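-- pv_equiv track=rewrite | github.com/ErikFagerli/AdventOfCode | 2023/Day_09/day_09.py | find_diff2
-- ===== SOURCE A (Python) =====
-- def find_diff2(row, storage=None):
--     if storage is None:
--         storage = []
--     diffs = [row[i+1] - row[i] for i in range(len(row)-1)]
--     storage.append(row[0])
--     # Check if every difference is the same
--     if len(set(diffs)) == 1:
--         storage.append(diffs[0])
--         storage.append(0)
--         return storage
--     else:
--         return find_diff2(diffs, storage)
-- ===== SOURCE B (Python) =====
-- def find_diff2(row, storage=None):
--     # Iterative re-implementation: a while-loop over the current level instead of recursion.
--     if storage is None: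
--         storage = []
--     cur = row
--     while True:
--         storage.append(cur[0])
--         diffs = [b - a for a, b in zip(cur, cur[1:])]
--         if diffs and all(d == diffs[0] for d in diffs):
--             storage.append(diffs[0])
--             storage.append(0)
--             return storage
--         cur = diffs
-- ===== Notes on version B (the rewrite author's own statement) =====
-- stated objective: simpler
-- what changed: Replaces the recursion with an explicit while-loop over the current level, builds each difference level with zip instead of index arithmetic, and tests constancy with all(...) instead of materialising a set; the loop avoids Python call overhead and the recursion-depth limit.
-- outside the precondition, e.g. on find_diff2([0], None): A raises IndexError, B raises IndexError
import Mathlib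
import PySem

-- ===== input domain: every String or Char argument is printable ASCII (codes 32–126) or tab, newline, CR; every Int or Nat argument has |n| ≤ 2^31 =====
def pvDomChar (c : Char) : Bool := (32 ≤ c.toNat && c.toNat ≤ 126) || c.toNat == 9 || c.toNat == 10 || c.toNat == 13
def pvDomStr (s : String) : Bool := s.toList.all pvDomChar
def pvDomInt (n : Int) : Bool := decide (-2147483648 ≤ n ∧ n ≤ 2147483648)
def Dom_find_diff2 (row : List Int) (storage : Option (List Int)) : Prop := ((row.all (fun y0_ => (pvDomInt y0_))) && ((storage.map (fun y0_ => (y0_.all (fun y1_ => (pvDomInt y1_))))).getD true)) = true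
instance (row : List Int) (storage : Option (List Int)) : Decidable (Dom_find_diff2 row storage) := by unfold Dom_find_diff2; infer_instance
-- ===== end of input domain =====

-- B replaces A's recursion with an explicit loop over the current level (zip-built diffs,
-- all(...)-based constancy test instead of a set); objective: simpler. Both Pythons append to a
-- caller-supplied `storage` list in place; the equivalence proved here is about the return value.


-- ===== PORT A =====
-- diffs = [row[i+1] - row[i] for i in range(len(row)-1)]  (indices always in range, so pyGetD is exact)
def diffsA (row : List Int) : List Int :=
  (List.range (row.length - 1)).map
    (fun (i : Nat) => PySem.List.pyGetD row ((i : Int) + 1) 0 - PySem.List.pyGetD row (i : Int) 0)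

def find_diff2 (row : List Int) (storage : Option (List Int)) : List Int :=
  match row with
  | [] => storage.getD []   -- Python raises IndexError on row[0]; excluded by Pre_
  | r0 :: rest =>
    let diffs := diffsA (r0 :: rest)
    let st2 := storage.getD [] ++ [r0]
    if (PySem.Set.ofList diffs).length = 1 then
      st2 ++ [PySem.List.pyGetD diffs 0 0, 0]
    else
      find_diff2 diffs (some st2)
termination_by row.length
decreasing_by simp [diffsA]

-- ===== PORT B =====
def find_diff2_altLoop (cur : List Int) (st : List Int) : List Int :=
  match cur with
  | [] => st                -- Python raises IndexError on cur[0]; excluded by Pre_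
  | c0 :: rest =>
    let st2 := st ++ [c0]
    let diffs := List.zipWith (fun a b => b - a) (c0 :: rest) rest
    if !diffs.isEmpty && diffs.all (fun d => d == diffs.headD 0) then
      st2 ++ [diffs.headD 0, 0]
    else find_diff2_altLoop diffs st2
termination_by cur.length
decreasing_by simp [List.length_zipWith]

def find_diff2_alt (row : List Int) (storage : Option (List Int)) : List Int :=
  find_diff2_altLoop row (storage.getD [])

-- ===== PRECONDITION & SPEC =====
-- Pre_ excludes rows of length < 2, on which both Pythons raise IndexError (row[0] of an
-- empty difference level).
def Pre_find_diff2 (row : List Int) (storage : Option (List Int)) : Prop := 2 ≤ row.length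
instance (row : List Int) (storage : Option (List Int)) : Decidable (Pre_find_diff2 row storage) := by unfold Pre_find_diff2; infer_instance
def pvWitness_find_diff2 : List Int × Option (List Int) := ([10, 13, 16, 21, 30, 45], none)

def Spec_find_diff2 (row : List Int) (storage : Option (List Int)) (out : List Int) : Prop := out = find_diff2_alt row storage
instance (row : List Int) (storage : Option (List Int)) (out : List Int) : Decidable (Spec_find_diff2 row storage out) := by unfold Spec_find_diff2; infer_instance

-- ===== CLAIM (what is proved, stated in full; the proofs are below) =====
def Claim_equal_find_diff2 : Prop := ∀ (row : List Int) (storage : Option (List Int)), Dom_find_diff2 row storage → Pre_find_diff2 row storage → Spec_find_diff2 row storage (find_diff2 row storage)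

-- ===== LEMMAS AND PROOFS =====

-- A's index-comprehension diffs equal B's zip-built diffs.
lemma diffsA_eq_zipWith (l : List Int) :
    diffsA l = List.zipWith (fun a b => b - a) l l.tail := by
  apply List.ext_getElem
  · simp [diffsA, List.length_zipWith]
  · intro i h1 h2
    have hi : i + 1 < l.length := by
      simp [List.length_zipWith] at h2; omega
    unfold diffsA
    rw [List.getElem_map, List.getElem_range, List.getElem_zipWith]
    have hc : ((i : Int) + 1) = ((i + 1 : Nat) : Int) := by push_cast; ring
    rw [hc, PySem.List.pyGetD_natCast, PySem.List.pyGetD_natCast,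
      List.getD_eq_getElem _ _ hi, List.getD_eq_getElem _ _ (show i < l.length by omega),
      List.getElem_tail]

-- Folding Set.add over elements already present leaves the set unchanged.
lemma foldl_add_of_mem (ds s : List Int) (hs : ∀ x ∈ ds, PySem.Set.contains s x = true) :
    ds.foldl PySem.Set.add s = s := by
  induction ds generalizing s with
  | nil => rfl
  | cons a t ih =>
    have ha : a ∈ s := by
      have := hs a (by simp)
      simpa [PySem.Set.contains] using this
    have : PySem.Set.add s a = s := by simp [PySem.Set.add, PySem.Set.contains, ha]
    rw [List.foldl_cons, this]
    exact ih s (fun x hx => hs x (by simp [hx]))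

-- len(set(l)) == 1 iff l is nonempty with all elements equal to its head.
lemma ofList_length_one_iff (d0 : Int) (ds : List Int) :
    (PySem.Set.ofList (d0 :: ds)).length = 1 ↔ ∀ d ∈ ds, d = d0 := by
  constructor
  · intro h d hd
    have hm : d ∈ PySem.Set.ofList (d0 :: ds) := (PySem.Set.mem_ofList _ _).2 (by simp [hd])
    have hm0 : d0 ∈ PySem.Set.ofList (d0 :: ds) := (PySem.Set.mem_ofList _ _).2 (by simp)
    match hS : PySem.Set.ofList (d0 :: ds), h with
    | [x], _ =>
      rw [hS] at hm hm0
      simp at hm hm0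
      omega
  · intro h
    have : PySem.Set.ofList (d0 :: ds) = [d0] := by
      rw [PySem.Set.ofList_eq_foldl, List.foldl_cons]
      have h0 : PySem.Set.add ([] : List Int) d0 = [d0] := rfl
      rw [h0]
      exact foldl_add_of_mem ds [d0]
        (fun x hx => by simp [PySem.Set.contains, h x hx])
    rw [this]
    rfl

lemma find_diff2_eq_altLoop (n : ℕ) :
    ∀ (cur : List Int) (storage : Option (List Int)), cur.length ≤ n →
      find_diff2 cur storage = find_diff2_altLoop cur (storage.getD []) := by
  induction n with
  | zero =>
    intro cur storage hle
    have : cur = [] := List.eq_nil_of_length_eq_zero (Nat.le_zero.1 hle)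
    subst this
    simp [find_diff2, find_diff2_altLoop]
  | succ n ih =>
    intro cur storage hle
    match cur with
    | [] => simp [find_diff2, find_diff2_altLoop]
    | c0 :: rest =>
      rw [find_diff2, find_diff2_altLoop]
      have hd := diffsA_eq_zipWith (c0 :: rest)
      simp only [List.tail_cons] at hd
      have hlen : (diffsA (c0 :: rest)).length ≤ n := by
        have : (diffsA (c0 :: rest)).length = rest.length := by simp [diffsA]
        simp at hle; omega
      match hdf : diffsA (c0 :: rest), hd, hlen with
      | [], hd, hlen =>
        rw [← hd]
        rw [if_neg (by decide : ¬ (PySem.Set.ofList ([] : List Int)).length = 1),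
          if_neg (by decide)]
        exact ih [] (some (storage.getD [] ++ [c0])) (by simp)
      | d0 :: ds, hd, hlen =>
        rw [← hd]
        by_cases hall : ∀ d ∈ ds, d = d0
        · rw [if_pos ((ofList_length_one_iff d0 ds).2 hall),
            if_pos (by simp [List.all_eq_true]; intro d hdm; exact hall d hdm)]
          simp [PySem.List.pyGetD]
        · rw [if_neg (fun hc => hall ((ofList_length_one_iff d0 ds).1 hc)),
            if_neg (by simp [List.all_eq_true]; push Not at hall; exact hall)]
          exact ih (d0 :: ds) (some (storage.getD [] ++ [c0])) hlen

-- ===== VERDICT (by name: the statement is the Claim_ definition above) =====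
theorem find_diff2_spec : Claim_equal_find_diff2 := by
  intro row storage _ _
  unfold Spec_find_diff2 find_diff2_alt
  exact find_diff2_eq_altLoop row.length row storage le_rfl
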